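-- pv_equiv track=rewrite | github.com/mintlayer/mintlayer-core | test/functional/mempool_feerate_points.py | interpolate_value
-- ===== SOURCE A (Python) =====
-- def interpolate_value(dictionary, key):
--     if key in dictionary:
--         # If the key is present, return the corresponding value
--         return dictionary[key]
--     else:
--         # If the key is not present, find the keys immediately below and above it
--         keys_below = [k for k in dictionary.keys() if k < key]
--         keys_above = [k for k in dictionary.keys() if k > key]
--
--         # Find the nearest keys below and above
--         k1 = max(keys_below) if keys_below else None
--         k2 = min(keys_above) if keys_above else None
--
--         # If both keys are found, perform linear interpolation
--         if k1 is not None and k2 is not None: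
--             v1 = dictionary[k1]
--             v2 = dictionary[k2]
--
--             # Calculate linearly interpolated value
--
--             scaled_v1 = v1 * (k2 - key);
--             scaled_v2 = v2 * (key - k1);
--             total_scale = k2 - k1;
--
--             return (scaled_v1 + scaled_v2) // total_scale;
--
--         # If no nearby keys are found, return None
--         return None
-- ===== SOURCE B (Python) =====
-- def interpolate_value(dictionary, key):
--     if key in dictionary:
--         return dictionary[key]
--     # sort the keys once and binary-search for the insertion point of `key`
--     ks = sorted(dictionary)
--     lo, hi = 0, len(ks)
--     while lo < hi:
--         mid = (lo + hi) // 2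
--         if ks[mid] < key:
--             lo = mid + 1
--         else:
--             hi = mid
--     if lo == 0 or lo == len(ks):
--         return None
--     k1, k2 = ks[lo - 1], ks[lo]
--     return (dictionary[k1] * (k2 - key) + dictionary[k2] * (key - k1)) // (k2 - k1)
-- ===== Notes on version B (the rewrite author's own statement) =====
-- stated objective: alternative
-- what changed: Replaced the two full key scans plus max/min with a single sort of the keys followed by a hand-written binary search for key's insertion point; the two neighbours are read off at indices lo-1 and lo.
import Mathlib
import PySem

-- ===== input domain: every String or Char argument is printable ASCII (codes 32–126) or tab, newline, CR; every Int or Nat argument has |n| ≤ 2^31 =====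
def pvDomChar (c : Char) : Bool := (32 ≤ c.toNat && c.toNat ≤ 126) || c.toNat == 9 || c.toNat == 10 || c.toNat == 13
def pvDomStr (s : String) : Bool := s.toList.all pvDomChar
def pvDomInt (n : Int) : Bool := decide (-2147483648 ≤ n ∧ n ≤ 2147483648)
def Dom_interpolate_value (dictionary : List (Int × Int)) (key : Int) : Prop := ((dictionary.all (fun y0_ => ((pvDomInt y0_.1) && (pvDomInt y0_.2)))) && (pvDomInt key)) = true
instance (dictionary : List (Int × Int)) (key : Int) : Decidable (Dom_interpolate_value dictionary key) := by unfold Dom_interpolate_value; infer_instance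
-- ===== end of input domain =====

-- B replaces A's two full key scans plus max/min with one sort of the keys and a hand-written binary search for key's insertion point (an alternative decomposition; no speed claim).



-- ===== PORT A =====
def interpolate_value (dictionary : List (Int × Int)) (key : Int) : Option Int :=
  let d := PySem.Dict.ofList dictionary
  if d.contains key then d.get? key
  else
    let keys_below := d.keys.filter (fun k => k < key)
    let keys_above := d.keys.filter (fun k => key < k)
    let k1? := PySem.List.max? keys_below (fun x => x)
    let k2? := PySem.List.min? keys_above (fun x => x)
    match k1?, k2? with
    | some k1, some k2 =>
      let v1 := (d.get? k1).getD 0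
      let v2 := (d.get? k2).getD 0
      let scaled_v1 := v1 * (k2 - key)
      let scaled_v2 := v2 * (key - k1)
      let total_scale := k2 - k1
      some (PySem.Int.floordiv (scaled_v1 + scaled_v2) total_scale)
    | _, _ => none

-- ===== PORT B =====
-- the `while lo < hi` binary-search loop of Source B, recursion on hi - lo
def pvBsearch (ks : List Int) (key : Int) (lo hi : Nat) : Nat :=
  if h : lo < hi then
    let mid := (lo + hi) / 2
    if ks.getD mid 0 < key then pvBsearch ks key (mid + 1) hi
    else pvBsearch ks key lo mid
  else lo
termination_by hi - lo
decreasing_by all_goals omega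



def interpolate_value_alt (dictionary : List (Int × Int)) (key : Int) : Option Int :=
  let d := PySem.Dict.ofList dictionary
  match d.get? key with
  | some v => some v
  | none =>
    let ks := PySem.List.sorted d.keys (fun x => x) false
    let lo := pvBsearch ks key 0 ks.length
    if lo = 0 ∨ lo = ks.length then none
    else
      let k1 := ks.getD (lo - 1) 0
      let k2 := ks.getD lo 0
      some (PySem.Int.floordiv ((d.get? k1).getD 0 * (k2 - key) + (d.get? k2).getD 0 * (key - k1)) (k2 - k1))


-- ===== PRECONDITION & SPEC =====
def Spec_interpolate_value (dictionary : List (Int × Int)) (key : Int) (out : Option Int) : Prop := out = interpolate_value_alt dictionary key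
instance (dictionary : List (Int × Int)) (key : Int) (out : Option Int) : Decidable (Spec_interpolate_value dictionary key out) := by unfold Spec_interpolate_value; infer_instance

-- ===== CLAIM (what is proved, stated in full; the proofs are below) =====
def Claim_equal_interpolate_value : Prop := ∀ (dictionary : List (Int × Int)) (key : Int), Dom_interpolate_value dictionary key → Spec_interpolate_value dictionary key (interpolate_value dictionary key)

-- ===== LEMMAS AND PROOFS =====
theorem foldl_max_eq (t : List Int) (x m : Int) (hm : m ∈ x :: t) (h : ∀ y ∈ x :: t, y ≤ m) :
    t.foldl max x = m := by
  induction t generalizing x with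
  | nil => simp only [List.mem_cons, List.not_mem_nil, or_false] at hm; simp [hm]
  | cons a t' ih =>
    simp only [List.foldl_cons]
    have hx := h x (by simp)
    have ha := h a (by simp)
    apply ih
    · rw [List.mem_cons, List.mem_cons] at hm
      rw [List.mem_cons]
      rcases hm with hm | hm | hm
      · left; rcases le_total x a with hxa | hxa
        · rw [max_eq_right hxa]; omega
        · rw [max_eq_left hxa]; omega
      · left; rcases le_total x a with hxa | hxa
        · rw [max_eq_right hxa]; omega
        · rw [max_eq_left hxa]; omega
      · right; exact hm
    · intro y hy
      rw [List.mem_cons] at hy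
      rcases hy with hy | hy
      · subst hy; exact max_le hx ha
      · exact h y (by simp [hy])

theorem max?_id_eq_some (xs : List Int) (m : Int) (hm : m ∈ xs) (h : ∀ y ∈ xs, y ≤ m) :
    PySem.List.max? xs (fun x => x) = some m := by
  match xs with
  | [] => simp at hm
  | x :: t => rw [PySem.List.max?_id_cons]; exact congrArg some (foldl_max_eq t x m hm h)

theorem foldl_min_eq (t : List Int) (x m : Int) (hm : m ∈ x :: t) (h : ∀ y ∈ x :: t, m ≤ y) :
    t.foldl min x = m := by
  induction t generalizing x with
  | nil => simp only [List.mem_cons, List.not_mem_nil, or_false] at hm; simp [hm]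
  | cons a t' ih =>
    simp only [List.foldl_cons]
    have hx := h x (by simp)
    have ha := h a (by simp)
    apply ih
    · rw [List.mem_cons, List.mem_cons] at hm
      rw [List.mem_cons]
      rcases hm with hm | hm | hm
      · left; rcases le_total x a with hxa | hxa
        · rw [min_eq_left hxa]; omega
        · rw [min_eq_right hxa]; omega
      · left; rcases le_total x a with hxa | hxa
        · rw [min_eq_left hxa]; omega
        · rw [min_eq_right hxa]; omega
      · right; exact hm
    · intro y hy
      rw [List.mem_cons] at hy
      rcases hy with hy | hy
      · subst hy; exact le_min hx ha
      · exact h y (by simp [hy])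

theorem min?_id_eq_some (xs : List Int) (m : Int) (hm : m ∈ xs) (h : ∀ y ∈ xs, m ≤ y) :
    PySem.List.min? xs (fun x => x) = some m := by
  match xs with
  | [] => simp at hm
  | x :: t => rw [PySem.List.min?_id_cons]; exact congrArg some (foldl_min_eq t x m hm h)

theorem pairwise_getElem_mono (ks : List Int) (hpw : ks.Pairwise (fun a b => a ≤ b))
    (i j : Nat) (_hij : i ≤ j) (hj : j < ks.length) : ks[i]'(by omega) ≤ ks[j] := by
  rcases Nat.lt_or_ge i j with h | h
  · exact List.pairwise_iff_getElem.mp hpw i j (by omega) hj h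
  · have : i = j := by omega
    subst this; exact le_refl _

theorem pvBsearch_spec_aux (ks : List Int) (key : Int)
    (hs : ks.Pairwise (fun a b => a ≤ b)) :
    ∀ (n lo hi : Nat), hi - lo ≤ n → lo ≤ hi → hi ≤ ks.length →
    (∀ j, j < lo → ∀ h : j < ks.length, ks[j] < key) →
    (∀ j, hi ≤ j → ∀ h : j < ks.length, key ≤ ks[j]) →
    (∀ j, j < pvBsearch ks key lo hi → ∀ h : j < ks.length, ks[j] < key) ∧
    (∀ j, pvBsearch ks key lo hi ≤ j → ∀ h : j < ks.length, key ≤ ks[j]) ∧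
    pvBsearch ks key lo hi ≤ ks.length := by
  have hmono := pairwise_getElem_mono ks hs
  intro n
  induction n with
  | zero =>
    intro lo hi hfuel hlh hhl hbelow habove
    have : lo = hi := by omega
    subst this
    rw [pvBsearch, dif_neg (by omega)]
    exact ⟨hbelow, habove, by omega⟩
  | succ n ih =>
    intro lo hi hfuel hlh hhl hbelow habove
    by_cases h : lo < hi
    · rw [pvBsearch, dif_pos h]
      have hmid : (lo + hi) / 2 < ks.length := by omega
      have hgd : ks.getD ((lo + hi) / 2) 0 = ks[(lo + hi) / 2] := List.getD_eq_getElem ks 0 hmid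
      by_cases hc : ks.getD ((lo + hi) / 2) 0 < key
      · rw [if_pos hc]
        apply ih ((lo + hi) / 2 + 1) hi (by omega) (by omega) hhl
        · intro j hj hjl
          rcases Nat.lt_or_ge j lo with h' | h'
          · exact hbelow j h' hjl
          · calc ks[j] ≤ ks[(lo + hi) / 2] := hmono j _ (by omega) hmid
                 _ < key := by rw [← hgd]; exact hc
        · exact habove
      · rw [if_neg hc]
        apply ih lo ((lo + hi) / 2) (by omega) (by omega) (by omega) hbelow
        intro j hj hjl
        calc key ≤ ks[(lo + hi) / 2] := by rw [← hgd]; omega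
             _ ≤ ks[j] := hmono _ j hj hjl
    · rw [pvBsearch, dif_neg h]
      have : lo = hi := by omega
      subst this
      exact ⟨hbelow, habove, by omega⟩


theorem pv_ports_agree (dictionary : List (Int × Int)) (key : Int) :
    interpolate_value dictionary key = interpolate_value_alt dictionary key := by
  unfold interpolate_value interpolate_value_alt
  set d := PySem.Dict.ofList dictionary with hd
  by_cases hc : d.contains key = true
  · rw [if_pos hc]
    have : (d.get? key).isSome := by rw [← PySem.Dict.contains_eq_isSome_get?]; exact hc
    obtain ⟨v, hv⟩ := Option.isSome_iff_exists.mp this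
    simp only [hv]
  · rw [if_neg hc]
    have hget : d.get? key = none := by
      cases hgv : d.get? key with
      | none => rfl
      | some v => exact absurd (by rw [PySem.Dict.contains_eq_isSome_get?, hgv]; rfl) hc
    simp only [hget]
    set ks := PySem.List.sorted d.keys (fun x => x) false with hks
    have hperm : ks.Perm d.keys := PySem.List.sorted_perm d.keys (fun x => x) false
    have hpw : ks.Pairwise (fun a b => a ≤ b) := PySem.List.sorted_pairwise d.keys (fun x => x)
    have hkeynot : key ∉ d.keys := by
      intro hmem
      exact hc (by rw [PySem.Dict.contains_eq_decide_mem_keys]; simp [hmem])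
    have hkeynks : key ∉ ks := fun h => hkeynot (hperm.mem_iff.mp h)
    obtain ⟨hb, ha, hr⟩ := pvBsearch_spec_aux ks key hpw ks.length 0 ks.length
      (by omega) (by omega) (by omega) (by omega) (by intro j hj hjl; omega)
    set r := pvBsearch ks key 0 ks.length with hrdef
    -- strict on the right: key ∉ ks
    have ha' : ∀ j, r ≤ j → ∀ h : j < ks.length, key < ks[j] := by
      intro j hj hjl
      have := ha j hj hjl
      rcases lt_or_eq_of_le this with h' | h'
      · exact h'
      · exact absurd (h' ▸ List.getElem_mem hjl) hkeynks
    by_cases hr0 : r = 0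
    · -- no keys below: filter (< key) is empty
      have hfil : d.keys.filter (fun k => decide (k < key)) = [] := by
        rw [List.filter_eq_nil_iff]
        intro a hamem
        have : a ∈ ks := hperm.mem_iff.mpr hamem
        obtain ⟨j, hjl, hje⟩ := List.mem_iff_getElem.mp this
        have := ha' j (by omega) hjl
        simp only [decide_eq_true_eq, not_lt]
        omega
      rw [if_pos (Or.inl hr0)]
      simp only [hfil, PySem.List.max?]
      rfl
    · by_cases hrl : r = ks.length
      · -- no keys above
        have hfil : d.keys.filter (fun k => decide (key < k)) = [] := by
          rw [List.filter_eq_nil_iff]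
          intro a hamem
          obtain ⟨j, hjl, hje⟩ := List.mem_iff_getElem.mp (hperm.mem_iff.mpr hamem)
          have := hb j (by omega) hjl
          simp only [decide_eq_true_eq, not_lt]
          omega
        rw [if_pos (Or.inr hrl)]
        simp only [hfil]
        cases hm : PySem.List.max? (d.keys.filter fun k => decide (k < key)) (fun x => x) <;>
          simp [PySem.List.min?]
      · -- both neighbours exist
        rw [if_neg (by omega)]
        have hrlen : r < ks.length := by omega
        have hr1 : r - 1 < ks.length := by omega
        have hk1d : ks.getD (r - 1) 0 = ks[r - 1] := List.getD_eq_getElem ks 0 hr1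
        have hk2d : ks.getD r 0 = ks[r] := List.getD_eq_getElem ks 0 hrlen
        have hmax : PySem.List.max? (d.keys.filter fun k => decide (k < key)) (fun x => x)
            = some (ks[r - 1]'hr1) := by
          apply max?_id_eq_some
          · rw [List.mem_filter]
            refine ⟨hperm.mem_iff.mp (List.getElem_mem hr1), ?_⟩
            simp only [decide_eq_true_eq]
            exact hb (r - 1) (by omega) hr1
          · intro y hy
            rw [List.mem_filter] at hy
            obtain ⟨hymem, hylt⟩ := hy
            simp only [decide_eq_true_eq] at hylt
            obtain ⟨j, hjl, hje⟩ := List.mem_iff_getElem.mp (hperm.mem_iff.mpr hymem)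
            rcases Nat.lt_or_ge j r with h' | h'
            · subst hje
              exact pairwise_getElem_mono ks hpw j (r-1) (by omega) hr1
            · have := ha' j h' hjl
              omega
        have hmin : PySem.List.min? (d.keys.filter fun k => decide (key < k)) (fun x => x)
            = some (ks[r]'hrlen) := by
          apply min?_id_eq_some
          · rw [List.mem_filter]
            refine ⟨hperm.mem_iff.mp (List.getElem_mem hrlen), ?_⟩
            simp only [decide_eq_true_eq]
            exact ha' r (by omega) hrlen
          · intro y hy
            rw [List.mem_filter] at hy
            obtain ⟨hymem, hylt⟩ := hy
            simp only [decide_eq_true_eq] at hylt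
            obtain ⟨j, hjl, hje⟩ := List.mem_iff_getElem.mp (hperm.mem_iff.mpr hymem)
            rcases Nat.lt_or_ge j r with h' | h'
            · have := hb j h' hjl; omega
            · subst hje; exact pairwise_getElem_mono ks hpw r j h' hjl
        simp only [hmax, hmin, hk1d, hk2d]

-- ===== VERDICT (by name: the statement is the Claim_ definition above) =====
theorem interpolate_value_spec : Claim_equal_interpolate_value := by
  intro dictionary key _hdom
  unfold Spec_interpolate_value
  exact pv_ports_agree dictionary key
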